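-- pv_equiv track=rewrite | github.com/dkang1630/Conductor_Image_Classification | conductor_analysis.py | find_nonzero_ranges
-- ===== SOURCE A (Python) =====
-- def find_nonzero_ranges(arr):
--     ranges = []
--     start = None
--     for idx, num in enumerate(arr):
--         if num != 0:
--             if start is None:
--                 start = idx  # Start of a new contiguous range
--         elif start is not None:
--             ranges.append((start, idx - 1))  # End of the current contiguous range
--             start = None  # Reset start for the next range
--     if start is not None:
--         ranges.append((start, len(arr) - 1))  # End of the last contiguous range
--     return ranges
-- ===== SOURCE B (Python) =====
-- def find_nonzero_ranges(arr):
--     n = len(arr)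
--     ranges = []
--     i = 0
--     while i < n:
--         if arr[i] != 0:
--             j = i + 1
--             while j < n and arr[j] != 0:
--                 j += 1
--             ranges.append((i, j - 1))
--             i = j
--         else:
--             i += 1
--     return ranges
-- ===== Notes on version B (the rewrite author's own statement) =====
-- stated objective: alternative
-- what changed: Replaces the single enumerate pass with an Optional pending-start state by a two-pointer index scan that skips zeros and consumes each whole nonzero run in an inner scan, emitting (run start, run end) directly with no Optional state and no final flush step.
import Mathlib
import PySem

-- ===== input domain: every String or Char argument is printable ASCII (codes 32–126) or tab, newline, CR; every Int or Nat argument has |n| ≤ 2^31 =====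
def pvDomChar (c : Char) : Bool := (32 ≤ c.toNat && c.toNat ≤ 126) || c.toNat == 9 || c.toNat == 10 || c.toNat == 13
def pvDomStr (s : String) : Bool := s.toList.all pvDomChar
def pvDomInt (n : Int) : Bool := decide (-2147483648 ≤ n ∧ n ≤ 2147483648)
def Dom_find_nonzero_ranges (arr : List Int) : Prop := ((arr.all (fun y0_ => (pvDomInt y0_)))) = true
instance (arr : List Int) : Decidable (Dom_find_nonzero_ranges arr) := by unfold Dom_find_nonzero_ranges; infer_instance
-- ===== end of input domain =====

-- B replaces A's single enumerate pass with Optional pending-start state by a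
-- two-pointer index scan (skip zeros / consume a whole nonzero run); alternative
-- decomposition, same cost.


-- ===== PORT A =====
-- the for-loop body: state = (ranges, start)
def pvStepA (s : List (Int × Int) × Option Int) (p : Int × Int) :
    List (Int × Int) × Option Int :=
  if p.2 ≠ 0 then
    match s.2 with
    | none => (s.1, some p.1)
    | some _ => s
  else
    match s.2 with
    | some st0 => (s.1 ++ [(st0, p.1 - 1)], none)
    | none => s

def find_nonzero_ranges (arr : List Int) : List (Int × Int) :=
  let st := (PySem.List.enumerate arr 0).foldl pvStepA ([], none)
  match st.2 with
  | some s => st.1 ++ [(s, (arr.length : Int) - 1)]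
  | none => st.1

-- ===== PORT B =====
-- inner while loop of Source B: advance j past the nonzero run
def pvScanB (arr : List Int) (n : Nat) (j : Nat) : Nat :=
  if _h : j < n then
    if arr.getD j 0 ≠ 0 then pvScanB arr n (j + 1) else j
  else j
termination_by n - j

theorem pvScanB_ge (arr : List Int) (n j : Nat) : j ≤ pvScanB arr n j := by
  unfold pvScanB
  split
  · split
    · exact le_trans (Nat.le_succ j) (pvScanB_ge arr n (j + 1))
    · exact le_refl j
  · exact le_refl j
termination_by n - j

-- outer while loop of Source B: state i, emitting ranges left to right
def pvLoopB (arr : List Int) (n : Nat) (i : Nat) : List (Int × Int) :=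
  if _h : i < n then
    if arr.getD i 0 ≠ 0 then
      ((i : Int), (pvScanB arr n (i + 1) : Int) - 1) :: pvLoopB arr n (pvScanB arr n (i + 1))
    else pvLoopB arr n (i + 1)
  else []
termination_by n - i
decreasing_by
  · have := pvScanB_ge arr n (i + 1); omega
  · omega

def find_nonzero_ranges_alt (arr : List Int) : List (Int × Int) :=
  pvLoopB arr arr.length 0

-- ===== PRECONDITION & SPEC =====
def Spec_find_nonzero_ranges (arr : List Int) (out : List (Int × Int)) : Prop := out = find_nonzero_ranges_alt arr
instance (arr : List Int) (out : List (Int × Int)) : Decidable (Spec_find_nonzero_ranges arr out) := by unfold Spec_find_nonzero_ranges; infer_instance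

-- ===== CLAIM (what is proved, stated in full; the proofs are below) =====
def Claim_equal_find_nonzero_ranges : Prop := ∀ (arr : List Int), Dom_find_nonzero_ranges arr → Spec_find_nonzero_ranges arr (find_nonzero_ranges arr)

-- ===== LEMMAS AND PROOFS =====

-- canonical structural description of the remaining output: suffix xs beginning
-- at (integer) index i, with pending run start st; closing index is i + |xs| - 1
def pvF : List Int → Int → Option Int → List (Int × Int)
  | [], _, none => []
  | [], i, some s => [(s, i - 1)]
  | x :: xs, i, none => if x ≠ 0 then pvF xs (i + 1) (some i) else pvF xs (i + 1) none
  | x :: xs, i, some s =>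
      if x ≠ 0 then pvF xs (i + 1) (some s) else (s, i - 1) :: pvF xs (i + 1) none

def pvFin (st : List (Int × Int) × Option Int) (e : Int) : List (Int × Int) :=
  match st.2 with
  | some s => st.1 ++ [(s, e)]
  | none => st.1

theorem pvA_eq_F (xs : List Int) :
    ∀ (i : Int) (acc : List (Int × Int)) (st : Option Int),
      pvFin ((PySem.List.enumerate xs i).foldl pvStepA (acc, st)) (i + xs.length - 1)
        = acc ++ pvF xs i st := by
  induction xs with
  | nil =>
    intro i acc st
    cases st <;> simp [PySem.List.enumerate_nil, pvFin, pvF]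
  | cons x xs ih =>
    intro i acc st
    rw [PySem.List.enumerate_cons, List.foldl_cons,
      show i + ((x :: xs).length : Int) - 1 = (i + 1) + (xs.length : Int) - 1 by
        simp only [List.length_cons]; push_cast; omega]
    by_cases hx : x = 0 <;> cases st <;>
      simp [pvStepA, pvF, hx, ih]

theorem pvB_eq_F (arr : List Int) : ∀ (k i : Nat), arr.length - i ≤ k →
    pvLoopB arr arr.length i = pvF (arr.drop i) (i : Int) none
    ∧ ∀ s : Int, (s, (pvScanB arr arr.length i : Int) - 1) :: pvLoopB arr arr.length (pvScanB arr arr.length i)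
        = pvF (arr.drop i) (i : Int) (some s) := by
  intro k
  induction k with
  | zero =>
    intro i hk
    have hge : arr.length ≤ i := by omega
    have hdrop : arr.drop i = [] := List.drop_eq_nil_of_le hge
    have hnl : ¬ i < arr.length := by omega
    constructor
    · rw [pvLoopB]; simp [hnl, hdrop, pvF]
    · intro s
      rw [pvScanB]; simp only [hnl, dif_neg, not_false_eq_true]
      rw [pvLoopB]; simp [hnl, hdrop, pvF]
  | succ k ih =>
    intro i hk
    by_cases hi : i < arr.length
    · have hdrop : arr.drop i = arr[i] :: arr.drop (i + 1) :=
        List.drop_eq_getElem_cons hi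
      have hgd : arr.getD i 0 = arr[i] := List.getD_eq_getElem arr 0 hi
      have hih := ih (i + 1) (by omega)
      by_cases hz : arr[i] ≠ 0
      · constructor
        · rw [pvLoopB]
          simp only [hi, dif_pos, hgd, hz, if_pos, not_false_eq_true, ite_true]
          rw [hdrop]
          have h2 := hih.2 (i : Int)
          push_cast at h2 ⊢
          simp only [pvF, hz, ne_eq, ite_true, if_pos, not_false_eq_true]
          exact h2.symm ▸ rfl
        · intro s
          rw [pvScanB]
          simp only [hi, dif_pos, hgd, hz, not_false_eq_true, ite_true, if_pos]
          rw [hdrop]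
          have h2 := hih.2 s
          push_cast at h2 ⊢
          simp only [pvF, hz, ne_eq, ite_true, if_pos, not_false_eq_true]
          exact h2.symm ▸ rfl
      · simp only [ne_eq, not_not] at hz
        constructor
        · rw [pvLoopB]
          simp only [hi, dif_pos, hgd, hz, ne_eq, not_true_eq_false, ite_false, if_neg,
            not_false_eq_true]
          rw [hdrop]
          simp only [pvF, hz, ne_eq, not_true_eq_false, ite_false, if_neg]
          have h1 := hih.1
          push_cast at h1 ⊢
          exact h1
        · intro s
          rw [pvScanB]
          simp only [hi, dif_pos, hgd, hz, ne_eq, not_true_eq_false, ite_false, if_neg]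
          rw [hdrop]
          simp only [pvF, hz, ne_eq, not_true_eq_false, ite_false, if_neg]
          have hLoop : pvLoopB arr arr.length i = pvLoopB arr arr.length (i + 1) := by
            rw [pvLoopB]
            simp [hi, hgd, hz]
          have h1 := hih.1
          push_cast at h1 ⊢
          rw [hLoop, h1]
    · -- i ≥ length: same as base case
      have hdrop : arr.drop i = [] := List.drop_eq_nil_of_le (by omega)
      constructor
      · rw [pvLoopB]; simp [hi, hdrop, pvF]
      · intro s
        rw [pvScanB]; simp only [hi, dif_neg, not_false_eq_true]
        rw [pvLoopB]; simp [hi, hdrop, pvF]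

-- ===== VERDICT (by name: the statement is the Claim_ definition above) =====
theorem find_nonzero_ranges_spec : Claim_equal_find_nonzero_ranges := by
  intro arr _
  unfold Spec_find_nonzero_ranges
  have hB : find_nonzero_ranges_alt arr = pvF arr 0 none := by
    unfold find_nonzero_ranges_alt
    simpa using (pvB_eq_F arr arr.length 0 (le_refl _)).1
  have hA : find_nonzero_ranges arr = pvF arr 0 none := by
    have h := pvA_eq_F arr 0 [] none
    unfold find_nonzero_ranges
    simpa [pvFin] using h
  rw [hA, hB]
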